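-- pv_equiv track=rewrite | github.com/Rct567/FrequencyMan | frequencyman/language_data.py | combine_lists_by_top_position
-- ===== SOURCE A (Python) =====
-- from typing import Iterator, NewType, Optional, Union, Iterable
--
-- def combine_lists_by_top_position(lists: Iterable[Iterable[tuple[str, int]]]) -> dict[str, int]:
--
--     words_positions_combined: dict[str, int] = {}
--
--     for word_list in lists:
--         for word, line_number in word_list:
--             assert line_number > 0
--             if word not in words_positions_combined or line_number < words_positions_combined[word]:
--                 words_positions_combined[word] = line_number
--
--     return words_positions_combined
-- ===== SOURCE B (Python) =====
-- def combine_lists_by_top_position(lists):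
--     # Pass 1: group every line number by word (asserting positivity as we go).
--     groups = {}
--     for word_list in lists:
--         for word, line_number in word_list:
--             assert line_number > 0
--             groups.setdefault(word, []).append(line_number)
--     # Pass 2: reduce each group to its minimum.
--     return {word: min(positions) for word, positions in groups.items()}
-- ===== Notes on version B (the rewrite author's own statement) =====
-- stated objective: alternative
-- what changed: Replaces the running-minimum update inside the scan by a two-pass group-then-reduce: first build a dict of all positions per word, then take min of each group in a comprehension.
import Mathlib
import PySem

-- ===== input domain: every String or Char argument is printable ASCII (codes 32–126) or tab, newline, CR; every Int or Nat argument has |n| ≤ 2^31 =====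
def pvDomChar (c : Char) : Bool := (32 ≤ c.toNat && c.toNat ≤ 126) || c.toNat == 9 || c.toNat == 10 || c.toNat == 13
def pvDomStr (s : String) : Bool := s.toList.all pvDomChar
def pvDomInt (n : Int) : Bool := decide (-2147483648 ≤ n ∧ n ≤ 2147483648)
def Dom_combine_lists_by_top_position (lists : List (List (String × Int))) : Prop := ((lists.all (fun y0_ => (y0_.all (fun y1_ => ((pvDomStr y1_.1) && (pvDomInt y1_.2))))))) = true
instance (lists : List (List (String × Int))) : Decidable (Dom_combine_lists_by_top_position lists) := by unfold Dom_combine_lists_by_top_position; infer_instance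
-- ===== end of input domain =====

-- B replaces A's running-minimum scan by a two-pass group-then-reduce (dict of positions per word, then min of each group); alternative decomposition, same cost.


-- ===== PORT A =====
-- 'if word not in d or n < d[word]: d[word] = n', nested over the lists; returns the dict's items.
def combine_lists_by_top_position (lists : List (List (String × Int))) : List (String × Int) :=
  (lists.foldl (fun d wl => wl.foldl (fun d p =>
      match d.get? p.1 with
      | none => d.insert p.1 p.2
      | some m => if p.2 < m then d.insert p.1 p.2 else d) d)
    (PySem.Dict.empty : PySem.Dict String Int)).items

-- ===== PORT B =====
-- min(positions) of a nonempty list (B only applies it to groups, which are never empty;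
-- the [] case is unreachable there).
def pvMinL (ps : List Int) : Int :=
  match ps with
  | [] => 0
  | p :: rest => rest.foldl min p

-- groups.setdefault(word, []).append(line_number) = modify word [] (· ++ [n])
def combine_lists_by_top_position_alt (lists : List (List (String × Int))) : List (String × Int) :=
  let groups := lists.foldl (fun g wl => wl.foldl (fun g p =>
      g.modify p.1 [] (fun ps => ps ++ [p.2])) g)
    (PySem.Dict.empty : PySem.Dict String (List Int))
  groups.items.map (fun q => (q.1, pvMinL q.2))

-- ===== PRECONDITION & SPEC =====
-- A (and B) assert every line number is positive: outside this, Python raises AssertionError.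
def Pre_combine_lists_by_top_position (lists : List (List (String × Int))) : Prop :=
  ∀ wl ∈ lists, ∀ p ∈ wl, 0 < p.2
instance (lists : List (List (String × Int))) : Decidable (Pre_combine_lists_by_top_position lists) := by unfold Pre_combine_lists_by_top_position; infer_instance
def pvWitness_combine_lists_by_top_position : (List (List (String × Int))) :=
  [[("a", 2), ("b", 1)], [("a", 1)]]
def Spec_combine_lists_by_top_position (lists : List (List (String × Int))) (out : List (String × Int)) : Prop := out = combine_lists_by_top_position_alt lists
instance (lists : List (List (String × Int))) (out : List (String × Int)) : Decidable (Spec_combine_lists_by_top_position lists out) := by unfold Spec_combine_lists_by_top_position; infer_instance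

-- ===== CLAIM (what is proved, stated in full; the proofs are below) =====
def Claim_equal_combine_lists_by_top_position : Prop := ∀ (lists : List (List (String × Int))), Dom_combine_lists_by_top_position lists → Pre_combine_lists_by_top_position lists → Spec_combine_lists_by_top_position lists (combine_lists_by_top_position lists)

-- ===== LEMMAS AND PROOFS =====

-- abbreviations for the two loop bodies (single pair step)
def pvStepA (d : PySem.Dict String Int) (p : String × Int) : PySem.Dict String Int :=
  match d.get? p.1 with
  | none => d.insert p.1 p.2
  | some m => if p.2 < m then d.insert p.1 p.2 else d

def pvStepB (g : PySem.Dict String (List Int)) (p : String × Int) : PySem.Dict String (List Int) :=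
  g.modify p.1 [] (fun ps => ps ++ [p.2])

lemma pvMinL_append_singleton (ps : List Int) (h : ps ≠ []) (n : Int) :
    pvMinL (ps ++ [n]) = min (pvMinL ps) n := by
  cases ps with
  | nil => exact absurd rfl h
  | cons p rest => simp [pvMinL, List.foldl_append]

-- the pointwise invariant: A's dict is always B's groups dict reduced by min
lemma pv_get?_invariant (L : List (String × Int)) :
    ∀ (d : PySem.Dict String Int) (g : PySem.Dict String (List Int)),
    (∀ k, d.get? k = (g.get? k).map pvMinL) →
    (∀ k ps, g.get? k = some ps → ps ≠ []) →
    (∀ k, (L.foldl pvStepA d).get? k = ((L.foldl pvStepB g).get? k).map pvMinL) ∧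
    (∀ k ps, (L.foldl pvStepB g).get? k = some ps → ps ≠ []) := by
  induction L with
  | nil => exact fun d g h hne => ⟨h, hne⟩
  | cons p L ih =>
    intro d g h hne
    simp only [List.foldl_cons]
    apply ih
    · intro k
      have hB : (pvStepB g p).get? k =
          if k = p.1 then some (g.getD p.1 [] ++ [p.2]) else g.get? k := by
        simp [pvStepB, PySem.Dict.modify, PySem.Dict.get?_insert]
      have hp := h p.1
      cases hg : g.get? p.1 with
      | none =>
        have hd : d.get? p.1 = none := by simp [hp, hg]
        have hgd : g.getD p.1 [] = [] := PySem.Dict.getD_of_get?_eq_none g [] hg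
        simp only [pvStepA, hd]
        rw [hB, PySem.Dict.get?_insert]
        by_cases hk : k = p.1 <;> simp [hk, h k, hgd, pvMinL]
      | some ps =>
        have hd : d.get? p.1 = some (pvMinL ps) := by simp [hp, hg]
        have hgd : g.getD p.1 [] = ps := PySem.Dict.getD_of_get?_eq_some g [] hg
        have hmin : pvMinL (ps ++ [p.2]) = min (pvMinL ps) p.2 :=
          pvMinL_append_singleton ps (hne p.1 ps hg) p.2
        simp only [pvStepA, hd]
        by_cases hlt : p.2 < pvMinL ps
        · simp only [if_pos hlt]
          rw [PySem.Dict.get?_insert, hB]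
          by_cases hk : k = p.1 <;> simp [hk, h k, hgd, hmin, min_eq_right (le_of_lt hlt)]
        · simp only [if_neg hlt]
          rw [hB]
          by_cases hk : k = p.1
          · subst hk; simp [hd, hgd, hmin, min_eq_left (le_of_not_gt hlt)]
          · simp [hk, h k]
    · intro k ps hk
      by_cases hkp : k = p.1
      · subst hkp
        simp [pvStepB, PySem.Dict.modify, PySem.Dict.get?_insert_self] at hk
        simp [← hk]
      · have : g.get? k = some ps := by
          simpa [pvStepB, PySem.Dict.modify, PySem.Dict.get?_insert_of_ne g _ hkp] using hk
        exact hne k ps this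

-- A's conditional-insert loop touches exactly the keys of L, in first-occurrence order
lemma pv_keysA (L : List (String × Int)) :
    ∀ (d : PySem.Dict String Int),
    (L.foldl pvStepA d).keys = PySem.Set.update d.keys (L.map (·.1)) := by
  induction L with
  | nil => intro d; simp [PySem.Set.update_nil]
  | cons p L ih =>
    intro d
    simp only [List.foldl_cons, List.map_cons, PySem.Set.update_cons]
    rw [ih]
    congr 1
    cases hg : d.get? p.1 with
    | none =>
      have hc : d.contains p.1 = false := by
        rw [PySem.Dict.contains_eq_isSome_get?, hg]; rfl
      have hm : p.1 ∉ d.keys := by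
        intro hmem
        rw [← PySem.Dict.contains_iff_mem_keys] at hmem
        simp [hc] at hmem
      simp [pvStepA, hg, PySem.Dict.keys_insert_of_not_contains d _ hc, PySem.Set.add, hm]
    | some m =>
      have hc : d.contains p.1 = true := by
        rw [PySem.Dict.contains_eq_isSome_get?, hg]; rfl
      have hm : p.1 ∈ d.keys := (PySem.Dict.contains_iff_mem_keys d p.1).mp hc
      simp only [pvStepA, hg]
      by_cases hlt : p.2 < m
      · simp [hlt, PySem.Dict.keys_insert_of_contains d _ hc, PySem.Set.add, hm]
      · simp [hlt, PySem.Set.add, hm]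

theorem combine_lists_by_top_position_spec_aux (lists : List (List (String × Int))) :
    combine_lists_by_top_position lists = combine_lists_by_top_position_alt lists := by
  unfold combine_lists_by_top_position combine_lists_by_top_position_alt
  rw [show (fun (d : PySem.Dict String Int) (wl : List (String × Int)) => wl.foldl (fun d p =>
        match d.get? p.1 with
        | none => d.insert p.1 p.2
        | some m => if p.2 < m then d.insert p.1 p.2 else d) d)
      = (fun d wl => wl.foldl pvStepA d) from rfl,
      show (fun (g : PySem.Dict String (List Int)) (wl : List (String × Int)) => wl.foldl (fun g p =>
        g.modify p.1 [] (fun ps => ps ++ [p.2])) g)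
      = (fun g wl => wl.foldl pvStepB g) from rfl,
      ← List.foldl_flatten, ← List.foldl_flatten]
  set L := lists.flatten with hL
  set DA := L.foldl pvStepA PySem.Dict.empty with hDA
  set GB := L.foldl pvStepB PySem.Dict.empty with hGB
  show DA.items = GB.items.map (fun q => (q.1, pvMinL q.2))
  have hinv := pv_get?_invariant L PySem.Dict.empty PySem.Dict.empty
    (by intro k; simp [PySem.Dict.get?_empty]) (by intro k ps h; simp [PySem.Dict.get?_empty] at h)
  -- keys agree (first-occurrence order of the words of L)
  have hkA : DA.keys = PySem.Set.ofList (L.map (·.1)) := by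
    rw [hDA, pv_keysA]; simp [PySem.Dict.keys_empty, PySem.Set.update_nil_left]
  have hkB : GB.keys = PySem.Set.ofList (L.map (·.1)) := by
    rw [hGB]
    have h := PySem.Dict.keys_foldl_modify_key (ν := List Int) L (·.1) [] (fun _ p ps => ps ++ [p.2]) PySem.Dict.empty
    simpa [pvStepB, PySem.Dict.keys_empty, PySem.Set.update_nil_left] using h
  have hndA : DA.keys.Nodup := by rw [hkA]; exact PySem.Set.nodup_ofList _
  have hndB : GB.keys.Nodup := by rw [hkB]; exact PySem.Set.nodup_ofList _
  rw [PySem.Dict.items_eq_map_keys DA hndA 0, PySem.Dict.items_eq_map_keys GB hndB [],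
      List.map_map, hkA, hkB]
  apply List.map_congr_left
  intro k hk
  have hmemB : GB.contains k = true := by
    rw [PySem.Dict.contains_iff_mem_keys, hkB]; exact hk
  have hsome : ∃ ps, GB.get? k = some ps := by
    rw [← Option.isSome_iff_exists, ← PySem.Dict.contains_eq_isSome_get?]; exact hmemB
  obtain ⟨ps, hps⟩ := hsome
  have hA : DA.get? k = some (pvMinL ps) := by rw [hinv.1 k, hps]; rfl
  simp [Function.comp, PySem.Dict.getD_of_get?_eq_some DA 0 hA, PySem.Dict.getD_of_get?_eq_some GB [] hps]

-- ===== VERDICT (by name: the statement is the Claim_ definition above) =====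
theorem combine_lists_by_top_position_spec : Claim_equal_combine_lists_by_top_position := by
  intro lists _ _
  unfold Spec_combine_lists_by_top_position
  exact combine_lists_by_top_position_spec_aux lists
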